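-- pv_equiv track=rewrite | github.com/ydsgangge-ux/VisionLearner_V4 | explorer.py | _prioritize_nodes
-- ===== SOURCE A (Python) =====
-- from typing import Dict, List, Any, Optional, Tuple, Union
--
-- def _prioritize_nodes(all_nodes: List[str], preferred_nodes: List[str]) -> List[str]:
--     """优先排序节点"""
--     # 将偏好的节点放在前面
--     result = []
--
--     # 添加偏好节点
--     for node in preferred_nodes:
--         if node in all_nodes and node not in result:
--             result.append(node)
--
--     # 添加其他节点
--     for node in all_nodes:
--         if node not in result:
--             result.append(node)
--
--     return result
-- ===== SOURCE B (Python) =====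
-- from typing import List
--
--
-- def _prioritize_nodes(all_nodes: List[str], preferred_nodes: List[str]) -> List[str]:
--     # rank each preferred node by its first occurrence; others rank after all preferred
--     rank = {}
--     for i, node in enumerate(preferred_nodes):
--         rank.setdefault(node, i)
--     missing = len(preferred_nodes)
--     deduped = list(dict.fromkeys(all_nodes))
--     return sorted(deduped, key=lambda node: rank.get(node, missing))
-- ===== Notes on version B (the rewrite author's own statement) =====
-- stated objective: faster
-- what changed: Replaces the two append-loops with linear scans over the growing result by a first-occurrence rank table, an ordered dedup, and one stable sort keyed by rank.
import Mathlib
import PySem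

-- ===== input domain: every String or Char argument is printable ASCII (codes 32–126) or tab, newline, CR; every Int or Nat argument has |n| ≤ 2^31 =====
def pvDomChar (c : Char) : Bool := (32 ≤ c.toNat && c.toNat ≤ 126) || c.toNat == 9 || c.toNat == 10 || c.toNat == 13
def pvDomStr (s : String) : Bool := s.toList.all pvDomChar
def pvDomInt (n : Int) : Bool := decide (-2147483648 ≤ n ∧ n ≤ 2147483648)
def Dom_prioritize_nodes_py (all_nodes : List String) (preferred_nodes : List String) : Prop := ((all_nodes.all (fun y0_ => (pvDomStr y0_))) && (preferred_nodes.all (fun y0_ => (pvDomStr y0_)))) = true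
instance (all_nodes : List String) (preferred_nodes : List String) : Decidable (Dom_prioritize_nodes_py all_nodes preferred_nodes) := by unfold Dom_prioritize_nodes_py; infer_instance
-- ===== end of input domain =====

-- B replaces A's two append-loops (each scanning the growing result) by a first-occurrence
-- rank table + ordered dedup + one stable sort keyed by rank (objective: faster).

-- ===== PORT A =====
def prioritize_nodes_py (all_nodes : List String) (preferred_nodes : List String) : List String :=
  -- result = []; for node in preferred_nodes: if node in all_nodes and node not in result: result.append(node)
  let result : List String :=
    preferred_nodes.foldl
      (fun result node =>
        if all_nodes.contains node && !(result.contains node) then result ++ [node] else result)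
      []
  -- for node in all_nodes: if node not in result: result.append(node)
  all_nodes.foldl
    (fun result node => if !(result.contains node) then result ++ [node] else result)
    result

-- ===== PORT B =====
def prioritize_nodes_py_alt (all_nodes : List String) (preferred_nodes : List String) : List String :=
  -- rank = {}; for i, node in enumerate(preferred_nodes): rank.setdefault(node, i)
  let rank : PySem.Dict String Int :=
    (PySem.List.enumerate preferred_nodes).foldl
      (fun d p => d.setdefault p.2 p.1) PySem.Dict.empty
  let missing : Int := preferred_nodes.length
  -- deduped = list(dict.fromkeys(all_nodes))
  let deduped : List String := PySem.List.dedup all_nodes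
  -- sorted(deduped, key=lambda node: rank.get(node, missing))
  PySem.List.sorted deduped (fun node => rank.getD node missing) false

-- ===== PRECONDITION & SPEC =====
def Spec_prioritize_nodes_py (all_nodes : List String) (preferred_nodes : List String) (out : List String) : Prop := out = prioritize_nodes_py_alt all_nodes preferred_nodes
instance (all_nodes : List String) (preferred_nodes : List String) (out : List String) : Decidable (Spec_prioritize_nodes_py all_nodes preferred_nodes out) := by unfold Spec_prioritize_nodes_py; infer_instance

-- ===== CLAIM (what is proved, stated in full; the proofs are below) =====
def Claim_equal_prioritize_nodes_py : Prop := ∀ (all_nodes : List String) (preferred_nodes : List String), Dom_prioritize_nodes_py all_nodes preferred_nodes → Spec_prioritize_nodes_py all_nodes preferred_nodes (prioritize_nodes_py all_nodes preferred_nodes)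

-- ===== LEMMAS AND PROOFS =====

def rankOf (pref : List String) : PySem.Dict String Int :=
  (PySem.List.enumerate pref).foldl (fun d p => d.setdefault p.2 p.1) PySem.Dict.empty

theorem rank_get? (l : List String) (s : Int) (d : PySem.Dict String Int) (n : String) :
    ((PySem.List.enumerate l s).foldl (fun d p => d.setdefault p.2 p.1) d).get? n
      = (d.get? n).or (if n ∈ l then some (s + (l.idxOf n : Int)) else none) := by
  induction l generalizing s d with
  | nil => simp [PySem.List.enumerate_nil]
  | cons a l ih =>
    rw [PySem.List.enumerate_cons, List.foldl_cons, ih]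
    by_cases hna : n = a
    · subst hna
      rw [PySem.Dict.get?_setdefault_self]
      cases hd : d.get? n with
      | some v => simp [List.idxOf_cons_self]
      | none => simp [List.idxOf_cons_self]
    · rw [PySem.Dict.get?_setdefault_of_ne _ _ hna]
      congr 1
      by_cases hnl : n ∈ l
      · simp only [hnl, if_true, List.mem_cons, hna, false_or]
        rw [List.idxOf_cons_ne _ (Ne.symm hna)]
        congr 1
        push_cast
        ring
      · simp [hnl, hna]

theorem key_mem (pref : List String) (n : String) (h : n ∈ pref) :
    (rankOf pref).getD n (pref.length : Int) = (pref.idxOf n : Int) := by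
  rw [PySem.Dict.getD_eq_get?_getD]
  unfold rankOf
  rw [rank_get?]
  simp [h]

theorem key_not_mem (pref : List String) (n : String) (h : n ∉ pref) :
    (rankOf pref).getD n (pref.length : Int) = (pref.length : Int) := by
  rw [PySem.Dict.getD_eq_get?_getD]
  unfold rankOf
  rw [rank_get?]
  simp [h]

theorem B_eq (all pref : List String) :
    prioritize_nodes_py_alt all pref =
      PySem.List.sorted (PySem.Set.ofList all)
        (fun n => (rankOf pref).getD n (pref.length : Int)) false := by
  simp [prioritize_nodes_py_alt, rankOf, PySem.List.dedup]

theorem loop2_eq (all : List String) (r : List String) :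
    all.foldl (fun result node => if !(result.contains node) then result ++ [node] else result) r
      = all.foldl PySem.Set.add r := by
  induction all generalizing r with
  | nil => rfl
  | cons a l ih =>
    simp only [List.foldl_cons, ih]
    congr 1
    by_cases h : a ∈ r
    · simp [PySem.Set.add, h]
    · simp [PySem.Set.add, h]

theorem loop1_eq (all pref : List String) (r : List String) :
    pref.foldl
      (fun result node =>
        if all.contains node && !(result.contains node) then result ++ [node] else result) r
      = (pref.filter (fun n => all.contains n)).foldl PySem.Set.add r := by
  induction pref generalizing r with
  | nil => rfl
  | cons a l ih =>
    rw [List.foldl_cons, List.filter_cons]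
    by_cases h : all.contains a = true
    · rw [h]
      simp only [Bool.true_and, if_true]
      rw [List.foldl_cons, ih]
      congr 1
      by_cases h2 : r.contains a = true
      · rw [h2]
        simp only [Bool.not_true, Bool.false_eq_true, if_false]
        simp [PySem.Set.add, PySem.Set.contains]
        simpa using h2
      · simp only [Bool.not_eq_true] at h2
        rw [h2]
        simp only [Bool.not_false, if_true]
        simp [PySem.Set.add, PySem.Set.contains]
        simpa using h2
    · simp only [Bool.not_eq_true] at h
      rw [h]
      simp only [Bool.false_and, Bool.false_eq_true, if_false]
      exact ih r

theorem insertBy_append_of_before {α : Type} (before : α → α → Bool) (x : α) (s e : List α)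
    (h : ∀ y ∈ e, before x y = true) :
    PySem.List.insertBy before x (s ++ e) = PySem.List.insertBy before x s ++ e := by
  induction s with
  | nil =>
    cases e with
    | nil => simp [PySem.List.insertBy]
    | cons y ys => simp [PySem.List.insertBy, h y (by simp)]
  | cons a s' ih =>
    simp only [List.cons_append, PySem.List.insertBy]
    by_cases hb : before x a = true
    · simp [hb]
    · simp only [Bool.not_eq_true] at hb
      simp [hb, ih]

theorem sorted_append_singleton {α : Type} (xs : List α) (x : α) (key : α → Int) :
    PySem.List.sorted (xs ++ [x]) key false
      = PySem.List.insertBy (fun a b => decide (key a < key b)) x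
          (PySem.List.sorted xs key false) := by
  rw [PySem.List.sorted_eq_foldl_insertBy, PySem.List.sorted_eq_foldl_insertBy, List.foldl_append]
  rfl

theorem sorted_split {α : Type} (key : α → Int) (M : Int) (xs : List α)
    (h : ∀ n ∈ xs, key n ≤ M) :
    PySem.List.sorted xs key false
      = PySem.List.sorted (xs.filter (fun n => decide (key n < M))) key false
          ++ xs.filter (fun n => decide (key n = M)) := by
  induction xs using List.reverseRecOn with
  | nil => simp [PySem.List.sorted]
  | append_singleton xs x ih =>
    have hx : key x ≤ M := h x (by simp)
    have hxs : ∀ n ∈ xs, key n ≤ M := fun n hn => h n (by simp [hn])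
    rw [sorted_append_singleton, ih hxs]
    by_cases hM : key x = M
    · have h1 : ∀ y ∈ PySem.List.sorted (xs.filter (fun n => decide (key n < M))) key false
          ++ xs.filter (fun n => decide (key n = M)), (fun a b => decide (key a < key b)) x y = false := by
        intro y hy
        rcases List.mem_append.mp hy with hy | hy
        · have := (PySem.List.mem_sorted _ _ _ _).mp hy
          have := List.of_mem_filter this
          simp only [decide_eq_true_eq] at this
          simp only [decide_eq_false_iff_not]
          omega
        · have := List.of_mem_filter hy
          simp only [decide_eq_true_eq] at this
          simp only [decide_eq_false_iff_not]
          omega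
      rw [PySem.List.insertBy_of_forall_not_before _ _ _ h1]
      rw [List.filter_append, List.filter_append]
      have h2 : List.filter (fun n => decide (key n < M)) [x] = [] := by
        simp; omega
      have h3 : List.filter (fun n => decide (key n = M)) [x] = [x] := by simp [hM]
      rw [h2, h3, List.append_nil, List.append_assoc]
    · have hlt : key x < M := lt_of_le_of_ne hx hM
      have h1 : ∀ y ∈ xs.filter (fun n => decide (key n = M)),
          (fun a b => decide (key a < key b)) x y = true := by
        intro y hy
        have := List.of_mem_filter hy
        simp only [decide_eq_true_eq] at this
        simp only [decide_eq_true_eq]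
        omega
      rw [insertBy_append_of_before _ _ _ _ h1]
      rw [List.filter_append, List.filter_append]
      have h2 : List.filter (fun n => decide (key n < M)) [x] = [x] := by simp [hlt]
      have h3 : List.filter (fun n => decide (key n = M)) [x] = [] := by
        simp; omega
      rw [h2, h3, List.append_nil, sorted_append_singleton]

theorem ofList_filter {α : Type} [BEq α] [LawfulBEq α] (p : α → Bool) (l : List α) :
    PySem.Set.ofList (l.filter p) = (PySem.Set.ofList l).filter p := by
  induction l with
  | nil => simp [PySem.Set.ofList_nil]
  | cons a l ih =>
    rw [List.filter_cons, PySem.Set.ofList_cons]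
    by_cases hp : p a = true
    · rw [hp]
      simp only [if_true]
      rw [PySem.Set.ofList_cons, ih, List.filter_cons, hp]
      simp only [if_true]
      congr 1
      unfold PySem.Set.discard
      rw [List.filter_filter, List.filter_filter]
      apply List.filter_congr
      intro y _
      cases p y <;> simp
    · simp only [Bool.not_eq_true] at hp
      rw [hp]
      simp only [Bool.false_eq_true, if_false]
      rw [ih]
      rw [List.filter_cons, hp]
      simp only [Bool.false_eq_true, if_false]
      unfold PySem.Set.discard
      rw [List.filter_filter]
      apply List.filter_congr
      intro y _
      by_cases hya : y == a
      · have : y = a := by simpa using hya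
        subst this
        simp [hp]
      · simp only [Bool.not_eq_true] at hya
        simp [hya]

theorem pairwise_idxOf {α : Type} [BEq α] [LawfulBEq α] (l : List α) :
    (PySem.Set.ofList l).Pairwise (fun a b => l.idxOf a < l.idxOf b) := by
  induction l with
  | nil => simp [PySem.Set.ofList_nil]
  | cons a l ih =>
    rw [PySem.Set.ofList_cons]
    constructor
    · intro b hb
      unfold PySem.Set.discard at hb
      have hba : ¬ (b == a) = true := by
        have := List.of_mem_filter hb
        simpa using this
      have hba' : b ≠ a := by simpa using hba
      rw [List.idxOf_cons_self, List.idxOf_cons_ne _ (Ne.symm hba')]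
      omega
    · have hsub : ((PySem.Set.ofList l).discard a).Pairwise (fun x y => l.idxOf x < l.idxOf y) := by
        unfold PySem.Set.discard
        exact ih.filter _
      apply hsub.imp_of_mem
      intro x y hx hy hxy
      unfold PySem.Set.discard at hx hy
      have hxa : x ≠ a := by have := List.of_mem_filter hx; simpa using this
      have hya : y ≠ a := by have := List.of_mem_filter hy; simpa using this
      rw [List.idxOf_cons_ne _ (Ne.symm hxa), List.idxOf_cons_ne _ (Ne.symm hya)]
      omega

theorem ofList_append_filter {α : Type} [BEq α] [LawfulBEq α] (u v : List α) :
    PySem.Set.ofList (u ++ v)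
      = PySem.Set.ofList u ++ (PySem.Set.ofList v).filter (fun x => !(u.contains x)) := by
  induction v using List.reverseRecOn with
  | nil => simp [PySem.Set.ofList_nil]
  | append_singleton v x ih =>
    rw [← List.append_assoc, PySem.Set.ofList_append_singleton, ih,
        PySem.Set.ofList_append_singleton]
    by_cases hv : x ∈ v
    · rw [PySem.Set.add_of_mem ((PySem.Set.mem_ofList _ _).mpr hv)]
      rw [PySem.Set.add_of_mem]
      rw [List.mem_append]
      by_cases hu : x ∈ u
      · exact Or.inl ((PySem.Set.mem_ofList _ _).mpr hu)
      · right
        rw [List.mem_filter]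
        exact ⟨(PySem.Set.mem_ofList _ _).mpr hv, by simpa using hu⟩
    · rw [PySem.Set.add_of_not_mem (fun hc => hv ((PySem.Set.mem_ofList _ _).mp hc))]
      rw [List.filter_append]
      by_cases hu : x ∈ u
      · have : List.filter (fun x => !(u.contains x)) [x] = [] := by simpa using hu
        rw [this, List.append_nil]
        rw [PySem.Set.add_of_mem]
        simp [PySem.Set.mem_ofList, hu]
      · have : List.filter (fun x => !(u.contains x)) [x] = [x] := by simpa using hu
        rw [this]
        rw [PySem.Set.add_of_not_mem]
        · rw [List.append_assoc]
        · rw [List.mem_append]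
          rintro (h | h)
          · exact hu ((PySem.Set.mem_ofList _ _).mp h)
          · exact hv ((PySem.Set.mem_ofList _ _).mp (List.mem_of_mem_filter h))

theorem A_eq (all pref : List String) :
    prioritize_nodes_py all pref
      = PySem.Set.ofList (pref.filter (fun n => all.contains n) ++ all) := by
  unfold prioritize_nodes_py
  rw [loop1_eq, loop2_eq]
  show List.foldl PySem.Set.add (List.foldl PySem.Set.add [] (pref.filter (fun n => all.contains n))) all = _
  rw [← List.foldl_append]
  rfl

theorem main_eq (all pref : List String) :
    prioritize_nodes_py all pref = prioritize_nodes_py_alt all pref := by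
  rw [A_eq, B_eq]
  have hkm : ∀ n ∈ pref, (rankOf pref).getD n (pref.length : Int) = (pref.idxOf n : Int) :=
    fun n hn => key_mem pref n hn
  have hklt : ∀ n ∈ pref, (rankOf pref).getD n (pref.length : Int) < (pref.length : Int) := by
    intro n hn
    rw [hkm n hn]
    exact_mod_cast List.idxOf_lt_length_iff.mpr hn
  have hknm : ∀ n, n ∉ pref → (rankOf pref).getD n (pref.length : Int) = (pref.length : Int) :=
    fun n hn => key_not_mem pref n hn
  have hle : ∀ n ∈ PySem.Set.ofList all, (rankOf pref).getD n (pref.length : Int) ≤ (pref.length : Int) := by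
    intro n _
    by_cases hn : n ∈ pref
    · exact le_of_lt (hklt n hn)
    · exact le_of_eq (hknm n hn)
  rw [sorted_split _ (pref.length : Int) _ hle]
  rw [ofList_append_filter]
  congr 1
  · -- preferred part: the strictly rank-increasing arrangement names the sorted list
    refine (PySem.List.sorted_eq_of_perm_of_pairwise_lt _ _ _ ?_ ?_).symm
    · rw [List.perm_ext_iff_of_nodup (PySem.Set.nodup_ofList _)
        ((PySem.Set.nodup_ofList _).filter _)]
      intro a
      rw [PySem.Set.mem_ofList, List.mem_filter, List.mem_filter, PySem.Set.mem_ofList]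
      constructor
      · rintro ⟨hp, hc⟩
        refine ⟨by simpa using hc, ?_⟩
        simp only [decide_eq_true_eq]
        exact hklt a hp
      · rintro ⟨ha, hk⟩
        simp only [decide_eq_true_eq] at hk
        by_cases hp : a ∈ pref
        · exact ⟨hp, by simpa using ha⟩
        · rw [hknm a hp] at hk; omega
    · rw [ofList_filter]
      refine ((pairwise_idxOf pref).filter _).imp_of_mem ?_
      intro a b ha hb hab
      have ha' : a ∈ pref := (PySem.Set.mem_ofList _ _).mp (List.mem_of_mem_filter ha)
      have hb' : b ∈ pref := (PySem.Set.mem_ofList _ _).mp (List.mem_of_mem_filter hb)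
      rw [hkm a ha', hkm b hb']
      exact_mod_cast hab
  · -- rest: key = length exactly on the non-preferred members
    apply List.filter_congr
    intro x hx
    have hxall : x ∈ all := (PySem.Set.mem_ofList _ _).mp hx
    by_cases hp : x ∈ pref
    · have h1 : (rankOf pref).getD x (pref.length : Int) ≠ (pref.length : Int) :=
        ne_of_lt (hklt x hp)
      simp only [h1, decide_false]
      symm
      simp [hp, hxall]
    · have h1 := hknm x hp
      simp only [h1, decide_true]
      symm
      simp [hp]

-- ===== VERDICT (by name: the statement is the Claim_ definition above) =====
theorem prioritize_nodes_py_spec : Claim_equal_prioritize_nodes_py := by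
  intro all pref _
  unfold Spec_prioritize_nodes_py
  exact main_eq all pref
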